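-- pv_equiv track=rewrite | github.com/aleksandermagi-dev/Lumen.AIv2 | src/lumen/tools/math_core.py | _merge_monomials
-- ===== SOURCE A (Python) =====
-- def _merge_monomials(
--     left: tuple[tuple[str, int], ...],
--     right: tuple[tuple[str, int], ...],
-- ) -> tuple[tuple[str, int], ...]:
--     powers: dict[str, int] = {}
--     for name, exponent in left + right:
--         powers[name] = powers.get(name, 0) + exponent
--     return tuple(sorted((name, exponent) for name, exponent in powers.items() if exponent))
-- ===== SOURCE B (Python) =====
-- def _merge_monomials(left, right):
--     items = sorted(left + right)
--     out = []
--     i = 0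
--     n = len(items)
--     while i < n:
--         name = items[i][0]
--         total = 0
--         while i < n and items[i][0] == name:
--             total += items[i][1]
--             i += 1
--         if total:
--             out.append((name, total))
--     return tuple(out)
-- ===== Notes on version B (the rewrite author's own statement) =====
-- stated objective: alternative
-- what changed: B replaces A's dict accumulation followed by a final sort with sort-first-then-one-linear-scan: it sorts the concatenated pair list and collapses consecutive runs of equal names by summing, emitting nonzero totals in order.
import Mathlib
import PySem

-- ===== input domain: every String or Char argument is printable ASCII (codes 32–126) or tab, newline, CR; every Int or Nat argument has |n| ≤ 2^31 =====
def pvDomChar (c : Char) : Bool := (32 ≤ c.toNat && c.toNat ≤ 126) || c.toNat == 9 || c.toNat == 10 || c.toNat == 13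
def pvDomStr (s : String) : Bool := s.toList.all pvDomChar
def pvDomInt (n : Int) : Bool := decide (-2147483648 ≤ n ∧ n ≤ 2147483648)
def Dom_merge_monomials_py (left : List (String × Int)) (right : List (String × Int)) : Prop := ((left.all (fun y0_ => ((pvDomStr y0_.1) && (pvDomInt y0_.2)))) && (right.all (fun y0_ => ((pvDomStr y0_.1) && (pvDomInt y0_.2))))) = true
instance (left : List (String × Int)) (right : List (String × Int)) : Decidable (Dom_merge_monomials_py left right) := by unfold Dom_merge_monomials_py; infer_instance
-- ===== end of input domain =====

-- B replaces A's dict accumulation + final sort by sort-first-then-one-scan over runs of equal names (alternative algorithm, same results).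


-- ===== PORT A =====
-- powers: dict accumulation over left + right, then sorted((name, e) for … if e) — Python tuple sort = sorted2 on (fst, snd)
def merge_monomials_py (left : List (String × Int)) (right : List (String × Int)) : List (String × Int) :=
  let powers : PySem.Dict String Int :=
    (left ++ right).foldl (fun d p => d.insert p.1 (d.getD p.1 0 + p.2)) PySem.Dict.empty
  PySem.List.sorted2 (powers.items.filter (fun p => p.2 != 0)) (fun p => p.1) (fun p => p.2) false

-- ===== PORT B =====
-- Source B's outer while loop: each step consumes one run of equal names (the inner while = takeWhile/dropWhile), summing into total
def pvGroup : List (String × Int) → List (String × Int)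
  | [] => []
  | (n, e) :: rest =>
    let tot := (rest.takeWhile (fun p => p.1 == n)).foldl (fun a p => a + p.2) e
    let r := rest.dropWhile (fun p => p.1 == n)
    if tot != 0 then (n, tot) :: pvGroup r else pvGroup r
termination_by l => l.length
decreasing_by all_goals exact Nat.lt_succ_of_le (List.length_dropWhile_le _ rest)

def merge_monomials_py_alt (left : List (String × Int)) (right : List (String × Int)) : List (String × Int) :=
  pvGroup (PySem.List.sorted2 (left ++ right) (fun p => p.1) (fun p => p.2) false)

-- ===== PRECONDITION & SPEC =====
def Spec_merge_monomials_py (left : List (String × Int)) (right : List (String × Int)) (out : List (String × Int)) : Prop := out = merge_monomials_py_alt left right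
instance (left : List (String × Int)) (right : List (String × Int)) (out : List (String × Int)) : Decidable (Spec_merge_monomials_py left right out) := by unfold Spec_merge_monomials_py; infer_instance

-- ===== CLAIM (what is proved, stated in full; the proofs are below) =====
def Claim_equal_merge_monomials_py : Prop := ∀ (left : List (String × Int)) (right : List (String × Int)), Dom_merge_monomials_py left right → Spec_merge_monomials_py left right (merge_monomials_py left right)

-- ===== LEMMAS AND PROOFS =====

-- total exponent of name n in the list l (the value both programs attach to n)
def pvSumFor (l : List (String × Int)) (n : String) : Int :=
  ((l.filter (fun p => p.1 == n)).map (fun p => p.2)).sum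

theorem pvSumFor_perm {l₁ l₂ : List (String × Int)} (h : l₁.Perm l₂) (n : String) :
    pvSumFor l₁ n = pvSumFor l₂ n :=
  ((h.filter _).map _).sum_eq

-- A's accumulation loop computes pvSumFor
theorem pv_getD_fold (l : List (String × Int)) (d : PySem.Dict String Int) (n : String) :
    (l.foldl (fun d p => d.insert p.1 (d.getD p.1 0 + p.2)) d).getD n 0
      = d.getD n 0 + pvSumFor l n := by
  induction l generalizing d with
  | nil => simp [pvSumFor]
  | cons p t ih =>
    simp only [List.foldl_cons, ih, PySem.Dict.getD_insert, pvSumFor, List.filter_cons]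
    by_cases h : n = p.1
    · simp [h]; ring
    · have hne : (p.1 == n) = false := by simp; exact fun e => h e.symm
      simp [h, hne]

-- insertion preserves a transitive ordering invariant
theorem pv_pairwise_insertBy {α : Type} (R : α → α → Prop) (b : α → α → Bool)
    (htrans : ∀ {x y z}, R x y → R y z → R x z) (x : α)
    (h1 : ∀ y, b x y = true → R x y) (h2 : ∀ y, b x y = false → R y x) :
    ∀ acc : List α, acc.Pairwise R → (PySem.List.insertBy b x acc).Pairwise R := by
  intro acc
  induction acc with
  | nil =>
    intro _
    rw [show PySem.List.insertBy b x [] = [x] from rfl]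
    simp
  | cons y t ih =>
    intro hp
    rw [List.pairwise_cons] at hp
    rw [show PySem.List.insertBy b x (y :: t)
        = if b x y = true then x :: y :: t else y :: PySem.List.insertBy b x t from rfl]
    by_cases hb : b x y = true
    · simp only [hb, if_true]
      exact List.Pairwise.cons
        (by intro z hz
            rcases List.mem_cons.mp hz with rfl | hz
            · exact h1 _ hb
            · exact htrans (h1 _ hb) (hp.1 _ hz))
        (List.Pairwise.cons hp.1 hp.2)
    · rw [Bool.not_eq_true] at hb
      simp only [hb, Bool.false_eq_true, if_false]
      exact List.Pairwise.cons
        (by intro z hz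
            rcases (PySem.List.mem_insertBy _ _ _ _).mp hz with rfl | hz
            · exact h2 _ hb
            · exact hp.1 _ hz)
        (ih hp.2)

-- sorted2 on (fst, snd) yields a list nondecreasing in fst
theorem pv_sorted2_pairwise_fst (xs : List (String × Int)) :
    (PySem.List.sorted2 xs (fun p => p.1) (fun p => p.2) false).Pairwise
      (fun a b => a.1 ≤ b.1) := by
  show (List.foldl (fun acc x => PySem.List.insertBy _ x acc) [] xs).Pairwise _
  suffices h : ∀ acc : List (String × Int), acc.Pairwise (fun a b => a.1 ≤ b.1) →
      (List.foldl (fun acc x => PySem.List.insertBy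
        (fun a b => decide (a.1 < b.1) || (!decide (b.1 < a.1) && decide (a.2 < b.2))) x acc) acc xs).Pairwise
        (fun a b => a.1 ≤ b.1) by
    exact h [] (by simp)
  induction xs with
  | nil => intro acc h; simpa using h
  | cons x t ih =>
    intro acc hacc
    simp only [List.foldl_cons]
    exact ih _ (pv_pairwise_insertBy (fun a b => a.1 ≤ b.1)
      (fun a b => decide (a.1 < b.1) || (!decide (b.1 < a.1) && decide (a.2 < b.2)))
      (fun hxy hyz => le_trans hxy hyz) x
      (by intro y hy
          simp only [Bool.or_eq_true, Bool.and_eq_true, Bool.not_eq_true',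
            decide_eq_true_eq, decide_eq_false_iff_not] at hy
          rcases hy with h | ⟨h, _⟩
          · exact le_of_lt h
          · exact le_of_not_gt h)
      (by intro y hy
          simp only [Bool.or_eq_false_iff, Bool.and_eq_false_iff, Bool.not_eq_false',
            decide_eq_true_eq, decide_eq_false_iff_not] at hy
          exact le_of_not_gt hy.1)
      acc hacc)

-- in a name-nondecreasing list headed by name n, everything after the run of n has a strictly larger name
theorem pv_drop_gt (n : String) (rest : List (String × Int))
    (hle : ∀ q ∈ rest, n ≤ q.1)
    (hp : rest.Pairwise (fun a b => a.1 ≤ b.1)) :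
    ∀ q ∈ rest.dropWhile (fun p => p.1 == n), n < q.1 := by
  induction rest with
  | nil => simp
  | cons y t ih =>
    rw [List.pairwise_cons] at hp
    rw [List.dropWhile_cons]
    by_cases hy : (y.1 == n) = true
    · simp only [hy, if_true]
      exact ih (fun q hq => hle q (List.mem_cons_of_mem _ hq)) hp.2
    · simp only [hy, Bool.false_eq_true, if_false]
      have hyn : n < y.1 := lt_of_le_of_ne (hle y (List.mem_cons_self))
        (by simp only [beq_iff_eq] at hy; exact fun e => hy e.symm)
      intro q hq
      rcases List.mem_cons.mp hq with rfl | hq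
      · exact hyn
      · exact lt_of_lt_of_le hyn (hp.1 q hq)

theorem pv_take_names (n : String) (rest : List (String × Int)) :
    ∀ q ∈ rest.takeWhile (fun p => p.1 == n), q.1 = n :=
  fun _ hq => beq_iff_eq.mp (List.mem_takeWhile_imp (p := fun (p : String × Int) => p.1 == n) hq)

-- the run total is the total exponent of the head name in the whole list
theorem pv_sumFor_head (n : String) (e : Int) (rest : List (String × Int))
    (hgt : ∀ q ∈ rest.dropWhile (fun p => p.1 == n), n < q.1) :
    pvSumFor ((n, e) :: rest) n
      = (rest.takeWhile (fun p => p.1 == n)).foldl (fun a p => a + p.2) e := by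
  rw [PySem.List.foldl_add]
  unfold pvSumFor
  conv_lhs => rw [← List.takeWhile_append_dropWhile (p := fun p => p.1 == n) (l := rest)]
  rw [List.filter_cons, List.filter_append]
  have h1 : (rest.takeWhile (fun p => p.1 == n)).filter (fun p => p.1 == n)
      = rest.takeWhile (fun p => p.1 == n) :=
    List.filter_eq_self.mpr (fun q hq => by simp [pv_take_names n rest q hq])
  have h2 : (rest.dropWhile (fun p => p.1 == n)).filter (fun p => p.1 == n) = [] :=
    List.filter_eq_nil_iff.mpr (fun q hq => by
      simp only [beq_iff_eq]; exact fun habs => absurd habs (ne_of_gt (hgt q hq)))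
  simp [h1, h2]

-- totals of other names are unaffected by dropping the head run
theorem pv_sumFor_rest (n : String) (e : Int) (rest : List (String × Int)) (m : String)
    (hm : m ≠ n) :
    pvSumFor ((n, e) :: rest) m = pvSumFor (rest.dropWhile (fun p => p.1 == n)) m := by
  unfold pvSumFor
  conv_lhs => rw [← List.takeWhile_append_dropWhile (p := fun p => p.1 == n) (l := rest)]
  rw [List.filter_cons, List.filter_append]
  have h0 : ((n, e).1 == m) = false := by simp; exact fun h => hm h.symm
  have h1 : (rest.takeWhile (fun p => p.1 == n)).filter (fun p => p.1 == m) = [] :=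
    List.filter_eq_nil_iff.mpr (fun q hq => by
      simp only [beq_iff_eq, pv_take_names n rest q hq]; exact fun h => hm h.symm)
  simp [h0, h1]

theorem pv_names_mem (n : String) (e : Int) (rest : List (String × Int)) (m : String) :
    m ∈ (((n, e) :: rest).map (fun q => q.1)) ↔
      m = n ∨ m ∈ ((rest.dropWhile (fun p => p.1 == n)).map (fun q => q.1)) := by
  constructor
  · intro h
    rcases List.mem_map.mp h with ⟨q, hq, rfl⟩
    rcases List.mem_cons.mp hq with rfl | hq
    · exact Or.inl rfl
    · rw [← List.takeWhile_append_dropWhile (p := fun p => p.1 == n) (l := rest)] at hq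
      rcases List.mem_append.mp hq with hq | hq
      · exact Or.inl (pv_take_names n rest q hq)
      · exact Or.inr (List.mem_map.mpr ⟨q, hq, rfl⟩)
  · intro h
    rcases h with rfl | h
    · exact List.mem_map.mpr ⟨(m, e), List.mem_cons_self, rfl⟩
    · rcases List.mem_map.mp h with ⟨q, hq, rfl⟩
      exact List.mem_map.mpr ⟨q, List.mem_cons_of_mem _ ((List.dropWhile_sublist _).mem hq), rfl⟩

-- B's scan: membership characterisation + strictly increasing names, on a name-nondecreasing list
theorem pv_group_spec : ∀ (N : Nat) (ys : List (String × Int)), ys.length ≤ N →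
    ys.Pairwise (fun a b => a.1 ≤ b.1) →
    (∀ p : String × Int, p ∈ pvGroup ys ↔
        (p.1 ∈ ys.map (fun q => q.1) ∧ p.2 = pvSumFor ys p.1 ∧ p.2 ≠ 0)) ∧
      (pvGroup ys).Pairwise (fun a b => a.1 < b.1) := by
  intro N
  induction N with
  | zero =>
    intro ys hlen _
    rw [Nat.le_zero, List.length_eq_zero_iff] at hlen
    subst hlen
    simp [pvGroup, pvSumFor]
  | succ N ihN =>
    intro ys hlen hs
    match ys with
    | [] => simp [pvGroup, pvSumFor]
    | (n, e) :: rest =>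
      rw [List.pairwise_cons] at hs
      have hgt : ∀ q ∈ rest.dropWhile (fun p => p.1 == n), n < q.1 :=
        pv_drop_gt n rest (fun q hq => hs.1 q hq) hs.2
      have hrp : (rest.dropWhile (fun p => p.1 == n)).Pairwise (fun a b => a.1 ≤ b.1) :=
        hs.2.sublist (List.dropWhile_sublist _)
      have hrlen : (rest.dropWhile (fun p => p.1 == n)).length ≤ N := by
        have := List.length_dropWhile_le (fun p => p.1 == n) rest
        simp only [List.length_cons] at hlen
        omega
      have ih := ihN _ hrlen hrp
      have hhead : pvSumFor ((n, e) :: rest) n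
          = (rest.takeWhile (fun p => p.1 == n)).foldl (fun a p => a + p.2) e :=
        pv_sumFor_head n e rest hgt
      rw [pvGroup]
      constructor
      · intro p
        by_cases htot :
            ((rest.takeWhile (fun p => p.1 == n)).foldl (fun a p => a + p.2) e) ≠ 0
        · rw [if_pos (bne_iff_ne.mpr htot)]
          constructor
          · intro hp
            rcases List.mem_cons.mp hp with rfl | hp
            · exact ⟨(pv_names_mem n e rest n).mpr (Or.inl rfl),
                by simp [hhead], by simpa [hhead] using htot⟩
            · obtain ⟨hm, hv, hnz⟩ := (ih.1 p).mp hp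
              have hpn : p.1 ≠ n := by
                rcases List.mem_map.mp hm with ⟨q, hq, hq1⟩
                exact hq1 ▸ ne_of_gt (hgt q hq)
              exact ⟨(pv_names_mem n e rest p.1).mpr (Or.inr hm),
                by rw [pv_sumFor_rest n e rest p.1 hpn]; exact hv, hnz⟩
          · rintro ⟨hm, hv, hnz⟩
            rw [List.mem_cons]
            by_cases hpn : p.1 = n
            · left
              have hp2 : p.2 = (rest.takeWhile (fun p => p.1 == n)).foldl (fun a p => a + p.2) e := by
                rw [hv, hpn, hhead]
              exact Prod.ext hpn hp2
            · right
              rcases (pv_names_mem n e rest p.1).mp hm with h | h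
              · exact absurd h hpn
              · exact (ih.1 p).mpr ⟨h,
                  by rw [← pv_sumFor_rest n e rest p.1 hpn]; exact hv, hnz⟩
        · rw [ne_eq, not_not] at htot
          rw [if_neg (by simp [htot])]
          constructor
          · intro hp
            obtain ⟨hm, hv, hnz⟩ := (ih.1 p).mp hp
            have hpn : p.1 ≠ n := by
              rcases List.mem_map.mp hm with ⟨q, hq, hq1⟩
              exact hq1 ▸ ne_of_gt (hgt q hq)
            exact ⟨(pv_names_mem n e rest p.1).mpr (Or.inr hm),
              by rw [pv_sumFor_rest n e rest p.1 hpn]; exact hv, hnz⟩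
          · rintro ⟨hm, hv, hnz⟩
            by_cases hpn : p.1 = n
            · exact absurd (by rw [hv, hpn, hhead, htot]) hnz
            · rcases (pv_names_mem n e rest p.1).mp hm with h | h
              · exact absurd h hpn
              · exact (ih.1 p).mpr ⟨h,
                  by rw [← pv_sumFor_rest n e rest p.1 hpn]; exact hv, hnz⟩
      · by_cases htot :
            ((rest.takeWhile (fun p => p.1 == n)).foldl (fun a p => a + p.2) e) ≠ 0
        · rw [if_pos (bne_iff_ne.mpr htot)]
          refine List.Pairwise.cons ?_ ih.2
          intro z hz
          obtain ⟨hm, _, _⟩ := (ih.1 z).mp hz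
          rcases List.mem_map.mp hm with ⟨q, hq, hq1⟩
          exact hq1 ▸ hgt q hq
        · rw [ne_eq, not_not] at htot
          rw [if_neg (by simp [htot])]
          exact ih.2

-- two insert-based sorts with agreeing comparators coincide
theorem pv_insertBy_congr {α : Type} (b1 b2 : α → α → Bool) (x : α) :
    ∀ ys : List α, (∀ y ∈ ys, b1 x y = b2 x y) →
      PySem.List.insertBy b1 x ys = PySem.List.insertBy b2 x ys := by
  intro ys
  induction ys with
  | nil => intro _; rfl
  | cons y t ih =>
    intro h
    rw [show PySem.List.insertBy b1 x (y :: t)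
        = if b1 x y = true then x :: y :: t else y :: PySem.List.insertBy b1 x t from rfl,
      show PySem.List.insertBy b2 x (y :: t)
        = if b2 x y = true then x :: y :: t else y :: PySem.List.insertBy b2 x t from rfl,
      h y List.mem_cons_self]
    by_cases hb : b2 x y = true
    · rw [if_pos hb, if_pos hb]
    · rw [if_neg hb, if_neg hb, ih (fun z hz => h z (List.mem_cons_of_mem _ hz))]

theorem pv_foldl_insertBy_congr {α : Type} (b1 b2 : α → α → Bool) (S : List α)
    (hS : ∀ x ∈ S, ∀ y ∈ S, b1 x y = b2 x y) :
    ∀ (l acc : List α), (∀ x ∈ l, x ∈ S) → (∀ y ∈ acc, y ∈ S) →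
      l.foldl (fun acc x => PySem.List.insertBy b1 x acc) acc
        = l.foldl (fun acc x => PySem.List.insertBy b2 x acc) acc := by
  intro l
  induction l with
  | nil => intro acc _ _; rfl
  | cons x t ih =>
    intro acc hl hacc
    have hx : x ∈ S := hl x List.mem_cons_self
    simp only [List.foldl_cons]
    rw [pv_insertBy_congr b1 b2 x acc (fun y hy => hS x hx y (hacc y hy))]
    exact ih _ (fun z hz => hl z (List.mem_cons_of_mem _ hz))
      (fun y hy => (PySem.List.mem_insertBy _ _ _ _).mp hy |>.elim
        (fun h => h ▸ hx) (fun h => hacc y h))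

-- on a list with pairwise-distinct names, the (fst, snd) tuple sort is the fst sort
theorem pv_sorted2_eq_sorted (L : List (String × Int))
    (hnd : (L.map (fun p => p.1)).Nodup) :
    PySem.List.sorted2 L (fun p => p.1) (fun p => p.2) false
      = PySem.List.sorted L (fun p => p.1) := by
  rw [PySem.List.sorted_eq_foldl_insertBy]
  show List.foldl (fun acc x => PySem.List.insertBy _ x acc) [] L = _
  apply pv_foldl_insertBy_congr _ _ L _ L [] (fun x hx => hx) (by simp)
  intro x hx y hy
  by_cases hxy : x.1 = y.1
  · have hxey : x = y := List.inj_on_of_nodup_map hnd hx hy hxy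
    subst hxey
    simp
  · by_cases hlt : x.1 < y.1
    · simp [hlt]
    · have hgt2 : y.1 < x.1 := lt_of_le_of_ne (le_of_not_gt hlt) (fun e => hxy e.symm)
      simp [hlt, hgt2]


-- ===== VERDICT (by name: the statement is the Claim_ definition above) =====
theorem merge_monomials_py_spec : Claim_equal_merge_monomials_py := by
  unfold Claim_equal_merge_monomials_py
  intro left right _
  unfold Spec_merge_monomials_py merge_monomials_py merge_monomials_py_alt
  set xs := left ++ right with hxs
  set powers := xs.foldl (fun d p => d.insert p.1 (d.getD p.1 0 + p.2)) PySem.Dict.empty with hpw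
  set ss := PySem.List.sorted2 xs (fun p => p.1) (fun p => p.2) false with hss
  set L := powers.items.filter (fun p => p.2 != 0) with hL
  -- A side facts
  have hkeysnd : powers.keys.Nodup := by
    rw [hpw]
    exact PySem.Dict.nodup_keys_foldl_insert_key xs (fun p => p.1)
      (fun d p => d.getD p.1 0 + p.2) PySem.Dict.empty (by simp [pysem])
  have hkeys : powers.keys = PySem.Set.ofList (xs.map (fun p => p.1)) := by
    rw [hpw, PySem.Dict.keys_foldl_insert_key]
    simp [pysem, PySem.Set.update, PySem.Set.ofList_eq_foldl]
  have hgetD : ∀ n, powers.getD n 0 = pvSumFor xs n := by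
    intro n
    rw [hpw, pv_getD_fold]
    simp [pysem]
  have hitems : powers.items = powers.keys.map (fun k => (k, powers.getD k 0)) :=
    PySem.Dict.items_eq_map_keys powers hkeysnd 0
  have hLmem : ∀ p : String × Int,
      p ∈ L ↔ (p.1 ∈ xs.map (fun q => q.1) ∧ p.2 = pvSumFor xs p.1 ∧ p.2 ≠ 0) := by
    intro p
    rw [hL, List.mem_filter, hitems, hkeys]
    constructor
    · rintro ⟨hp, hnz⟩
      rcases List.mem_map.mp hp with ⟨k, hk, rfl⟩
      rw [PySem.Set.mem_ofList] at hk
      refine ⟨hk, (hgetD k).symm ▸ rfl, by simpa using hnz⟩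
    · rintro ⟨hm, hv, hnz⟩
      constructor
      · refine List.mem_map.mpr ⟨p.1, (PySem.Set.mem_ofList _ _).mpr hm, ?_⟩
        rw [hgetD, ← hv]
      · simpa using hnz
  have hLfstnd : (L.map (fun p => p.1)).Nodup := by
    have hsub : (L.map (fun p => p.1)).Sublist (powers.items.map (fun p => p.1)) := by
      rw [hL]
      exact List.Sublist.map _ List.filter_sublist
    refine hsub.nodup ?_
    rw [hitems, List.map_map,
      show ((fun p : String × Int => p.1) ∘ fun k => (k, powers.getD k 0)) = id from rfl,
      List.map_id]
    exact hkeysnd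
  have hLnd : L.Nodup := hLfstnd.of_map
  -- B side facts
  have hssperm : ss.Perm xs := PySem.List.sorted2_perm xs _ _ false
  have hsspair : ss.Pairwise (fun a b => a.1 ≤ b.1) := pv_sorted2_pairwise_fst xs
  have hgs := pv_group_spec ss.length ss (le_refl _) hsspair
  have hBmem : ∀ p : String × Int,
      p ∈ pvGroup ss ↔ (p.1 ∈ xs.map (fun q => q.1) ∧ p.2 = pvSumFor xs p.1 ∧ p.2 ≠ 0) := by
    intro p
    rw [hgs.1 p, (hssperm.map (fun q => q.1)).mem_iff, pvSumFor_perm hssperm]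
  have hBnd : (pvGroup ss).Nodup :=
    hgs.2.imp (fun {a b} h => by exact fun e => absurd (congrArg Prod.fst e) (ne_of_lt h))
  -- conclude
  have hperm : (pvGroup ss).Perm L :=
    (List.perm_ext_iff_of_nodup hBnd hLnd).mpr (fun p => by rw [hBmem p, hLmem p])
  calc PySem.List.sorted2 L (fun p => p.1) (fun p => p.2) false
      = PySem.List.sorted L (fun p => p.1) := pv_sorted2_eq_sorted L hLfstnd
    _ = pvGroup ss := PySem.List.sorted_eq_of_perm_of_pairwise_lt L (pvGroup ss)
        (fun p => p.1) hperm hgs.2
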